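-- pv_equiv track=rewrite | github.com/tahmid-saj/data-structures-algorithms | leetcode/python/0137_single_number_II.py | sorting
-- ===== SOURCE A (Python) =====
-- def sorting(nums):
--     nums.sort()
--
--     for i in range(0, len(nums) - 1, 3):
--         if nums[i] == nums[i + 1]:
--             continue
--         else:
--             return nums[i]
--
--     return nums[len(nums) - 1]
-- ===== SOURCE B (Python) =====
-- def sorting(nums):
--     nums.sort()
--     n = len(nums)
--     # positions where a new run of equal values begins in the sorted list
--     starts = [p for p in range(1, n) if nums[p] != nums[p - 1]]
--     cands = [p for p in starts if p % 3 == 1]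
--     return nums[cands[0] - 1] if cands else nums[n - 1]
-- ===== Notes on version B (the rewrite author's own statement) =====
-- stated objective: alternative
-- what changed: A walks the sorted list with an early-return stride-3 index loop comparing nums[i] with nums[i+1]; B instead computes the run-boundary positions of the sorted list (where the value changes) in one comprehension and selects the answer arithmetically: the first boundary p with p % 3 == 1 marks the singleton, whose value is nums[p-1]; with no such boundary the answer is the last element.
import Mathlib
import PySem

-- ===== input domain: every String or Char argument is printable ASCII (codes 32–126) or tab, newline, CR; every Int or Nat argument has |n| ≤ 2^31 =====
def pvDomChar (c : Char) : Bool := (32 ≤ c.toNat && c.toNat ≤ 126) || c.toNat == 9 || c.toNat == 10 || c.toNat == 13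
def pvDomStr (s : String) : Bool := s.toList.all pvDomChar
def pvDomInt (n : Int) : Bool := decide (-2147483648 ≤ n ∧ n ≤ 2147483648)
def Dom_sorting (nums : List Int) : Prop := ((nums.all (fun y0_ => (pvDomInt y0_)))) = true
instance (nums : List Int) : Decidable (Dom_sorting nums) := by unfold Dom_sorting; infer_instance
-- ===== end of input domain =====

-- B replaces A's early-return stride-3 index loop by computing the run-boundary positions of the
-- sorted list and selecting the first boundary p with p % 3 == 1 arithmetically (objective:
-- alternative).  A sorts `nums` in place (and B does the same); the equivalence proved here is
-- about the return value.

-- ===== PORT A =====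
-- the loop 'for i in range(0, len(nums)-1, 3)': indices i and i+1 are always in range there,
-- so pyGetD's default 0 is never consulted
def sortingGo (s : List Int) : List Int → Option Int
  | [] => none
  | i :: rest =>
      if PySem.List.pyGetD s i 0 == PySem.List.pyGetD s (i + 1) 0 then
        sortingGo s rest
      else
        some (PySem.List.pyGetD s i 0)

def sorting (nums : List Int) : Int :=
  let s := PySem.List.sorted nums (fun x => x)
  match sortingGo s (PySem.List.pyRange 0 ((s.length : Int) - 1) 3) with
  | some v => v
  | none => PySem.List.pyGetD s ((s.length : Int) - 1) 0  -- nums[len(nums)-1]; raises on [] (Pre_)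

-- ===== PORT B =====
-- Source B: run-start positions of the sorted list, then the ones with p % 3 == 1; all the indices
-- p, p-1, cands[0]-1, n-1 used are in range, so pyGetD's default 0 is never consulted
def sorting_alt (nums : List Int) : Int :=
  let s := PySem.List.sorted nums (fun x => x)
  let n : Int := (s.length : Int)
  let starts := (PySem.List.pyRange 1 n 1).filter
      (fun p => !(PySem.List.pyGetD s p 0 == PySem.List.pyGetD s (p - 1) 0))
  let cands := starts.filter (fun p => PySem.Int.mod p 3 == 1)
  match cands with
  | c :: _ => PySem.List.pyGetD s (c - 1) 0
  | [] => PySem.List.pyGetD s (n - 1) 0  -- nums[n-1]; raises on [] (Pre_)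

-- ===== PRECONDITION & SPEC =====
-- A evaluates nums[len(nums)-1] on the empty list and raises IndexError there
def Pre_sorting (nums : List Int) : Prop := nums ≠ []
instance (nums : List Int) : Decidable (Pre_sorting nums) := by unfold Pre_sorting; infer_instance
def pvWitness_sorting : List Int := ([5])

def Spec_sorting (nums : List Int) (out : Int) : Prop := out = sorting_alt nums
instance (nums : List Int) (out : Int) : Decidable (Spec_sorting nums out) := by unfold Spec_sorting; infer_instance

-- ===== CLAIM =====
def Claim_equal_sorting : Prop := ∀ (nums : List Int), Dom_sorting nums → Pre_sorting nums → Spec_sorting nums (sorting nums)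

-- ===== LEMMAS AND PROOFS =====

-- nums[len(nums)-1] on the (sorted) list, shared shape of both ports' fallback
def lastD (s : List Int) : Int := PySem.List.pyGetD s ((s.length : Int) - 1) 0

-- B's fused filter predicate (starts-filter then mod-filter, combined by List.filter_filter)
def predB (s : List Int) (p : Int) : Bool :=
  (PySem.Int.mod p 3 == 1) && (!(PySem.List.pyGetD s p 0 == PySem.List.pyGetD s (p - 1) 0))

theorem pyRange3_nil (a b : Int) (h : b ≤ a) : PySem.List.pyRange a b 3 = [] := by
  rw [PySem.List.pyRange_of_pos a b (by norm_num)]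
  simp [if_neg (not_lt.mpr h)]

theorem pyRange3_cons (a b : Int) (h : a < b) :
    PySem.List.pyRange a b 3 = a :: PySem.List.pyRange (a + 3) b 3 := by
  rw [PySem.List.pyRange_of_pos a b (by norm_num),
      PySem.List.pyRange_of_pos (a + 3) b (by norm_num)]
  have hn : ((b - a + 3 - 1) / 3).toNat
      = (if a + 3 < b then ((b - (a + 3) + 3 - 1) / 3).toNat else 0) + 1 := by
    split_ifs with h2 <;> omega
  rw [if_pos h, hn, List.range_succ_eq_map]
  simp only [List.map_cons, List.map_map, Nat.cast_zero, mul_zero, add_zero]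
  congr 1
  apply List.map_congr_left
  intro k _
  simp only [Function.comp_apply, Nat.succ_eq_add_one]
  push_cast
  ring

theorem mod3_val (a : Int) (_h : 0 ≤ a) : PySem.Int.mod a 3 = a % 3 :=
  PySem.Int.mod_eq_emod_of_pos (by norm_num)

theorem go_eq (s : List Int) : ∀ (m k : Nat), s.length ≤ m + k → k % 3 = 0 →
    (match sortingGo s (PySem.List.pyRange (k : Int) ((s.length : Int) - 1) 3) with
     | some v => v | none => lastD s)
    = (match (PySem.List.pyRange ((k : Int) + 1) (s.length : Int) 1).filter (predB s) with
     | c :: _ => PySem.List.pyGetD s (c - 1) 0 | [] => lastD s) := by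
  intro m
  induction m with
  | zero =>
    intro k hk _
    rw [pyRange3_nil _ _ (by omega), PySem.List.pyRange_one_eq_nil (by omega)]
    simp [sortingGo]
  | succ m ih =>
    intro k hk hk3
    by_cases hlt : (k : Int) + 1 < (s.length : Int)
    · -- A's loop has an iteration at i = k (k ≤ len - 2)
      rw [pyRange3_cons _ _ (by omega), PySem.List.pyRange_one_cons hlt]
      simp only [sortingGo, List.filter_cons]
      by_cases hab : PySem.List.pyGetD s (k : Int) 0 = PySem.List.pyGetD s ((k : Int) + 1) 0
      · -- matched pair: A continues at k + 3; on B's side k+1 fails the mismatch test,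
        -- and k+2, k+3 fail the mod-3 test, so B's filter continues at k + 4
        have hpred : predB s ((k : Int) + 1) = false := by
          simp [predB, show (k : Int) + 1 - 1 = (k : Int) by ring, hab.symm]
        rw [if_pos (by simpa using hab), hpred]
        simp only [Bool.false_eq_true, if_false]
        have hstep := ih (k + 3) (by omega) (by omega)
        rw [show ((k + 3 : Nat) : Int) = (k : Int) + 3 by push_cast; ring] at hstep
        rw [hstep]
        -- filter over [k+2, …, n) = filter over [k+4, …, n): k+2 and k+3 fail predB's mod test
        have drop1 : ∀ (a : Int), 0 ≤ a → a % 3 ≠ 1 →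
            (PySem.List.pyRange a (s.length : Int) 1).filter (predB s)
            = (PySem.List.pyRange (a + 1) (s.length : Int) 1).filter (predB s) := by
          intro a ha hm
          by_cases h : a < (s.length : Int)
          · have h2 : (PySem.Int.mod a 3 == 1) = false := by
              rw [mod3_val a ha]; simpa using hm
            have hpf : predB s a = false := by
              unfold predB; rw [h2, Bool.false_and]
            rw [PySem.List.pyRange_one_cons h, List.filter_cons, hpf]
            simp
          · rw [PySem.List.pyRange_one_eq_nil (by omega),
                PySem.List.pyRange_one_eq_nil (by omega)]
        rw [show (k : Int) + 1 + 1 = (k : Int) + 2 by ring,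
            drop1 ((k : Int) + 2) (by omega) (by omega),
            show (k : Int) + 2 + 1 = (k : Int) + 3 by ring,
            drop1 ((k : Int) + 3) (by omega) (by omega)]
      · -- mismatch: A returns s[k]; on B's side k+1 is the first candidate, B returns s[k]
        have hm : (PySem.Int.mod ((k : Int) + 1) 3 == 1) = true := by
          rw [mod3_val _ (by omega)]; simp; omega
        have hx : PySem.List.pyGetD s ((k : Int) + 1) 0 ≠ PySem.List.pyGetD s ((k : Int) + 1 - 1) 0 := by
          rw [show (k : Int) + 1 - 1 = (k : Int) by ring]; exact fun e => hab e.symm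
        have hpred : predB s ((k : Int) + 1) = true := by
          unfold predB
          rw [hm, Bool.true_and, Bool.not_eq_eq_eq_not, Bool.not_true, beq_eq_false_iff_ne]
          exact hx
        rw [if_neg (by simpa using hab), hpred]
        simp [show (k : Int) + 1 - 1 = (k : Int) by ring]
    · -- past the end: both lists are empty, both sides fall back to the last element
      rw [pyRange3_nil _ _ (by omega), PySem.List.pyRange_one_eq_nil (by omega)]
      simp [sortingGo]

-- ===== VERDICT =====
theorem sorting_spec : Claim_equal_sorting := by
  intro nums _ _
  unfold Spec_sorting sorting sorting_alt
  simp only [List.filter_filter]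
  have h := go_eq (PySem.List.sorted nums (fun x => x))
      (PySem.List.sorted nums (fun x => x)).length 0 (by omega) (by omega)
  simp only [Nat.cast_zero, zero_add] at h
  exact h
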